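-- pv_equiv track=rewrite | github.com/giladkah/agentops | services/token_optimizer.py | _collapse_repeated_errors
-- ===== SOURCE A (Python) =====
-- def _collapse_repeated_errors(text: str) -> str:
--     """Collapse repeated identical error lines."""
--     lines = text.split("\n")
--     if len(lines) < 10:
--         return text
--
--     result = []
--     prev_line = None
--     repeat_count = 0
--
--     for line in lines:
--         if line == prev_line:
--             repeat_count += 1
--         else:
--             if repeat_count > 2:
--                 result.append(f"  ... (repeated {repeat_count} more times)")
--             elif repeat_count > 0:
--                 for _ in range(repeat_count):
--                     result.append(prev_line)
--             result.append(line)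
--             prev_line = line
--             repeat_count = 0
--
--     if repeat_count > 2:
--         result.append(f"  ... (repeated {repeat_count} more times)")
--     elif repeat_count > 0:
--         for _ in range(repeat_count):
--             result.append(prev_line)
--
--     return "\n".join(result)
-- ===== SOURCE B (Python) =====
-- def _collapse_repeated_errors(text: str) -> str:
--     """Collapse repeated identical error lines (two staged passes:
--     a comprehension computes all run-boundary indices, then each run
--     [s, e) is rendered independently from adjacent boundary pairs)."""
--     lines = text.split("\n")
--     if len(lines) < 10:
--         return text
--
--     n = len(lines)
--     # pass 1: positions where a new run of equal lines begins, plus the end sentinel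
--     bounds = [i for i in range(n) if i == 0 or lines[i] != lines[i - 1]] + [n]
--     # pass 2: render each run from its pair of adjacent boundaries
--     pieces = []
--     for s, e in zip(bounds, bounds[1:]):
--         run = e - s
--         if run > 3:
--             pieces.append(lines[s])
--             pieces.append(f"  ... (repeated {run - 1} more times)")
--         else:
--             pieces.extend([lines[s]] * run)
--     return "\n".join(pieces)
-- ===== Notes on version B (the rewrite author's own statement) =====
-- stated objective: alternative
-- what changed: Replaces A's single-pass prev_line/repeat_count state machine (with a trailing flush) by two staged passes: a comprehension first computes the list of run-boundary indices, then each run is rendered independently from zipped adjacent boundary pairs.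
import Mathlib
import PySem

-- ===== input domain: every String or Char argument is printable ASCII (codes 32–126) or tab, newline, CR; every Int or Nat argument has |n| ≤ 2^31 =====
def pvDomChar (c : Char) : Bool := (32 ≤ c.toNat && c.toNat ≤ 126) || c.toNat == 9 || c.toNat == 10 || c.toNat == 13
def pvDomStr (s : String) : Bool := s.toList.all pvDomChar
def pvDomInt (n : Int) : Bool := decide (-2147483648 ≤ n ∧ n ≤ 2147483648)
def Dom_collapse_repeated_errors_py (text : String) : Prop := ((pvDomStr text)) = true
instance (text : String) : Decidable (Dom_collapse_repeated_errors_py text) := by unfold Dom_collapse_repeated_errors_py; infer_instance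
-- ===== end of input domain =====

-- B replaces A's single-pass prev_line/repeat_count state machine (with trailing flush)
-- by two staged passes: a comprehension computing all run-boundary indices, then an
-- independent rendering of each run from zipped adjacent boundary pairs (alternative).

-- ===== PORT A =====

def pvMsg (c : Int) : String := "  ... (repeated " ++ PySem.Int.toStr c ++ " more times)"

-- one iteration of A's for-loop; state = (result, prev_line, repeat_count)
def pvStepA (st : List String × Option String × Int) (line : String) :
    List String × Option String × Int :=
  match st with
  | (res, prev, cnt) =>
    if some line == prev then (res, prev, cnt + 1)
    else
      let res := if cnt > 2 then res ++ [pvMsg cnt]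
                 -- prev_line is a string (not None) whenever repeat_count > 0
                 else if cnt > 0 then res ++ List.replicate cnt.toNat (prev.getD "")
                 else res
      (res ++ [line], some line, 0)

def collapse_repeated_errors_py (text : String) : String :=
  let lines := (PySem.Str.split? text "\n").getD []  -- sep "\n" ≠ "", so split? is always some
  if lines.length < 10 then text
  else
    let st := lines.foldl pvStepA ([], none, 0)
    let res := st.1
    let prev := st.2.1
    let cnt := st.2.2
    let res := if cnt > 2 then res ++ [pvMsg cnt]
               else if cnt > 0 then res ++ List.replicate cnt.toNat (prev.getD "")
               else res
    PySem.Str.join "\n" res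

-- ===== PORT B =====

-- the comprehension's filter condition: i == 0 or lines[i] != lines[i-1]
-- (indices are nonnegative and in range here, so Nat indexing with getD is exact)
def pvCond (lines : List String) (i : Nat) : Bool :=
  i == 0 || !(lines.getD i "" == lines.getD (i - 1) "")

-- pass 1: [i for i in range(n) if i == 0 or lines[i] != lines[i-1]]
def pvStarts (lines : List String) : List Nat :=
  (List.range lines.length).filter (pvCond lines)

-- the body of B's rendering loop for one boundary pair (s, e)
def pvRender (lines : List String) (p : Nat × Nat) : List String :=
  let run := p.2 - p.1
  if run > 3 then [lines.getD p.1 "", pvMsg (Int.ofNat (run - 1))]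
  else List.replicate run (lines.getD p.1 "")

def collapse_repeated_errors_py_alt (text : String) : String :=
  let lines := (PySem.Str.split? text "\n").getD []  -- sep "\n" ≠ "", so split? is always some
  if lines.length < 10 then text
  else
    let bounds := pvStarts lines ++ [lines.length]
    PySem.Str.join "\n" ((bounds.zip bounds.tail).flatMap (pvRender lines))

-- ===== PRECONDITION & SPEC =====
def Spec_collapse_repeated_errors_py (text : String) (out : String) : Prop := out = collapse_repeated_errors_py_alt text
instance (text : String) (out : String) : Decidable (Spec_collapse_repeated_errors_py text out) := by unfold Spec_collapse_repeated_errors_py; infer_instance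

-- ===== CLAIM (what is proved, stated in full; the proofs are below) =====
def Claim_equal_collapse_repeated_errors_py : Prop := ∀ (text : String), Dom_collapse_repeated_errors_py text → Spec_collapse_repeated_errors_py text (collapse_repeated_errors_py text)

-- ===== LEMMAS AND PROOFS =====

-- proof-side intermediate: run-length recursion both ports are related to
def pvRun (l : String) : List String → Nat × List String
  | [] => (0, [])
  | x :: xs => if x == l then ((pvRun l xs).1 + 1, (pvRun l xs).2) else (0, x :: xs)

theorem pvRun_len (l : String) : ∀ xs : List String, (pvRun l xs).2.length ≤ xs.length
  | [] => le_refl _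
  | x :: xs => by
    simp only [pvRun]
    split
    · exact le_trans (pvRun_len l xs) (Nat.le_succ _)
    · exact le_refl _

def pvAltLoop : List String → List String
  | [] => []
  | x :: xs =>
    let nr := pvRun x xs
    if nr.1 + 1 > 3 then x :: pvMsg (Int.ofNat nr.1) :: pvAltLoop nr.2
    else List.replicate (nr.1 + 1) x ++ pvAltLoop nr.2
termination_by l => l.length
decreasing_by
  all_goals exact Nat.lt_succ_of_le (pvRun_len x xs)

-- A's trailing flush, as a function of the loop state
def pvFlush (st : List String × Option String × Int) : List String :=
  match st with
  | (res, prev, cnt) =>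
    if cnt > 2 then res ++ [pvMsg cnt]
    else if cnt > 0 then res ++ List.replicate cnt.toNat (prev.getD "")
    else res

-- what a finished run of line p with k extra repetitions contributes (after p itself)
def pvEmit (p : String) (k : Nat) : List String :=
  if k > 2 then [pvMsg (Int.ofNat k)] else List.replicate k p

theorem pvAltLoop_cons (x : String) (xs : List String) :
    pvAltLoop (x :: xs) = x :: (pvEmit x (pvRun x xs).1 ++ pvAltLoop (pvRun x xs).2) := by
  rw [pvAltLoop]
  by_cases h : (pvRun x xs).1 > 2
  · have h3 : (pvRun x xs).1 + 1 > 3 := by omega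
    simp [h3, pvEmit, h]
  · have h3 : ¬ ((pvRun x xs).1 + 1 > 3) := by omega
    simp [h3, pvEmit, h, List.replicate_succ]

theorem pvFlush_int_nat (res : List String) (p : String) (k : Nat) :
    pvFlush (res, some p, (k : Int)) = res ++ pvEmit p k := by
  simp only [pvFlush, pvEmit]
  by_cases h : k > 2
  · have : ((k : Int) > 2) := by exact_mod_cast h
    simp [h, this]
  · have h2 : ¬ ((k : Int) > 2) := by exact_mod_cast h
    by_cases h0 : k > 0
    · simp [h, Int.toNat_natCast]
    · have hk : k = 0 := by omega
      subst hk
      simp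

theorem pvFlush_proj (st : List String × Option String × Int) :
    (if st.2.2 > 2 then st.1 ++ [pvMsg st.2.2]
     else if st.2.2 > 0 then st.1 ++ List.replicate st.2.2.toNat (st.2.1.getD "")
     else st.1) = pvFlush st := by
  rcases st with ⟨a, b, c⟩; rfl

-- main invariant for A's loop: running from state (acc, some p, k) and flushing
-- yields acc, then the rendering of p's continued run, then the rendering of the rest
theorem pvInv : ∀ (lines acc : List String) (p : String) (k : Nat),
    pvFlush (lines.foldl pvStepA (acc, some p, (k : Int))) =
      acc ++ pvEmit p (k + (pvRun p lines).1) ++ pvAltLoop (pvRun p lines).2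
  | [], acc, p, k => by
    simp [pvRun, pvAltLoop, pvFlush_int_nat]
  | x :: xs, acc, p, k => by
    simp only [List.foldl_cons]
    by_cases hx : x = p
    · subst hx
      have hstep : pvStepA (acc, some x, (k : Int)) x = (acc, some x, ((k + 1 : Nat) : Int)) := by
        simp only [pvStepA, beq_self_eq_true, if_true, Prod.mk.injEq, true_and]
        push_cast
        ring
      rw [hstep, pvInv xs acc x (k + 1)]
      have hr : pvRun x (x :: xs) = ((pvRun x xs).1 + 1, (pvRun x xs).2) := by
        simp [pvRun]
      rw [hr]
      have hk : k + 1 + (pvRun x xs).1 = k + ((pvRun x xs).1 + 1) := by omega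
      rw [hk]
    · have hb : (some x == some p) = false := by
        simp [hx]
      have hstep : pvStepA (acc, some p, (k : Int)) x
          = ((acc ++ pvEmit p k) ++ [x], some x, (0 : Int)) := by
        simp only [pvStepA, hb, Bool.false_eq_true, if_false]
        rw [← pvFlush_int_nat acc p k]
        simp [pvFlush]
      rw [hstep]
      rw [show (0 : Int) = ((0 : Nat) : Int) from rfl,
        pvInv xs ((acc ++ pvEmit p k) ++ [x]) x 0]
      have hr : pvRun p (x :: xs) = (0, x :: xs) := by
        simp [pvRun, hx]
      rw [hr, pvAltLoop_cons]
      simp [pvEmit]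
termination_by lines => lines.length
decreasing_by all_goals simp

theorem pvMain (x : String) (xs : List String) :
    pvFlush ((x :: xs).foldl pvStepA ([], none, 0)) = pvAltLoop (x :: xs) := by
  have hstep : pvStepA ([], none, (0 : Int)) x = ([x], some x, (0 : Int)) := by
    simp [pvStepA]
  rw [List.foldl_cons, hstep, show (0 : Int) = ((0 : Nat) : Int) from rfl,
    pvInv xs [x] x 0, pvAltLoop_cons]
  simp

-- ===== B-side lemmas: the boundary rendering equals pvAltLoop =====

def pvBounds (lines : List String) : List Nat := pvStarts lines ++ [lines.length]

def pvB (lines : List String) : List String :=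
  ((pvBounds lines).zip (pvBounds lines).tail).flatMap (pvRender lines)

theorem pvRun_decomp (l : String) : ∀ xs : List String,
    xs = List.replicate (pvRun l xs).1 l ++ (pvRun l xs).2
  | [] => rfl
  | x :: xs => by
    by_cases h : x = l
    · subst h
      simp only [pvRun, beq_self_eq_true, if_true, List.replicate_succ, List.cons_append,
        List.cons.injEq, true_and]
      exact pvRun_decomp x xs
    · simp [pvRun, h]

theorem pvRun_head (l : String) : ∀ xs : List String,
    (pvRun l xs).2 = [] ∨ ((pvRun l xs).2 ≠ [] ∧ (pvRun l xs).2.getD 0 "" ≠ l)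
  | [] => Or.inl rfl
  | x :: xs => by
    by_cases h : x = l
    · subst h
      simpa [pvRun] using pvRun_head x xs
    · exact Or.inr (by simp [pvRun, h])

theorem pvGetD_run_left (k : Nat) (x : String) (rest : List String) (i : Nat) (h : i < k) :
    (List.replicate k x ++ rest).getD i "" = x := by
  rw [List.getD_eq_getElem?_getD, List.getElem?_append_left (by simpa using h)]
  simp [h]

theorem pvGetD_run_right (k : Nat) (x : String) (rest : List String) (j : Nat) :
    (List.replicate k x ++ rest).getD (k + j) "" = rest.getD j "" := by
  rw [List.getD_eq_getElem?_getD, List.getElem?_append_right (by simp)]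
  simp [List.getD_eq_getElem?_getD]

theorem pvStarts_run (k : Nat) (hk : 1 ≤ k) (x : String) (rest : List String)
    (hhead : rest = [] ∨ (rest ≠ [] ∧ rest.getD 0 "" ≠ x)) :
    pvStarts (List.replicate k x ++ rest) = 0 :: (pvStarts rest).map (· + k) := by
  obtain ⟨m, rfl⟩ : ∃ m, k = m + 1 := ⟨k - 1, by omega⟩
  set l := List.replicate (m + 1) x ++ rest with hl
  have hlen : l.length = (m + 1) + rest.length := by simp [hl]
  have hsplit : List.range l.length =
      List.range (m + 1) ++ (List.range rest.length).map ((m + 1) + ·) := by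
    rw [hlen, List.range_add]
  -- the filter over the first run keeps only 0
  have hfirst : (List.range (m + 1)).filter (pvCond l) = [0] := by
    rw [List.range_succ_eq_map]
    rw [List.filter_cons]
    have h0 : pvCond l 0 = true := by simp [pvCond]
    rw [if_pos h0]
    have : ((List.range m).map Nat.succ).filter (pvCond l) = [] := by
      rw [List.filter_eq_nil_iff]
      intro a ha
      simp only [List.mem_map, List.mem_range] at ha
      obtain ⟨j, hj, rfl⟩ := ha
      have h1 : l.getD (j + 1) "" = x := pvGetD_run_left _ _ _ _ (by omega)
      have h2 : l.getD j "" = x := pvGetD_run_left _ _ _ _ (by omega)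
      simp only [List.getD_eq_getElem?_getD] at h1 h2
      simp [pvCond, Nat.succ_eq_add_one, h1, h2]
    rw [this]
  -- over the rest, the condition transports
  have hcondshift : ∀ j, j < rest.length → pvCond l ((m + 1) + j) = pvCond rest j := by
    intro j hjlen
    cases j with
    | zero =>
      have hne : rest ≠ [] ∧ rest.getD 0 "" ≠ x := by
        cases hhead with
        | inl h => subst h; simp at hjlen
        | inr h => exact h
      have h1 : l.getD (m + 1 + 0) "" = rest.getD 0 "" := by
        simpa using pvGetD_run_right (m + 1) x rest 0
      have h2 : l.getD (m + 1 + 0 - 1) "" = x := pvGetD_run_left _ _ _ _ (by omega)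
      simp only [List.getD_eq_getElem?_getD, Nat.add_zero, Nat.add_sub_cancel] at h1 h2
      have hx0 : ¬ rest[0]?.getD "" = x := by
        simpa [List.getD_eq_getElem?_getD] using hne.2
      simp only [pvCond]
      simp [h1, h2, hx0]
    | succ i =>
      have h1 : l.getD ((m + 1) + (i + 1)) "" = rest.getD (i + 1) "" :=
        pvGetD_run_right (m + 1) x rest (i + 1)
      have h2 : l.getD ((m + 1) + i) "" = rest.getD i "" :=
        pvGetD_run_right (m + 1) x rest i
      simp only [List.getD_eq_getElem?_getD] at h1 h2
      have hidx : (m + 1) + (i + 1) - 1 = (m + 1) + i := by omega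
      simp [pvCond, hidx, h1, h2]
  have hsecond : ((List.range rest.length).map ((m + 1) + ·)).filter (pvCond l)
      = (pvStarts rest).map (· + (m + 1)) := by
    rw [List.filter_map]
    have hfc : List.filter (pvCond l ∘ fun j => (m + 1) + j) (List.range rest.length)
        = List.filter (pvCond rest) (List.range rest.length) := by
      apply List.filter_congr
      intro j hj
      simp only [Function.comp_apply]
      exact hcondshift j (List.mem_range.mp hj)
    rw [hfc]
    unfold pvStarts
    exact List.map_congr_left (fun a _ => Nat.add_comm _ _)
  unfold pvStarts
  rw [show l.length = (List.replicate (m+1) x ++ rest).length from rfl, ← hl, hsplit,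
    List.filter_append, hfirst, hsecond]
  rfl

theorem pvBounds_head (rest : List String) : ∃ bs, pvBounds rest = 0 :: bs := by
  cases rest with
  | nil => exact ⟨[], rfl⟩
  | cons y ys =>
    unfold pvBounds pvStarts
    rw [show (y :: ys).length = ys.length + 1 from rfl, List.range_succ_eq_map,
      List.filter_cons]
    rw [if_pos (by simp [pvCond])]
    exact ⟨_, rfl⟩

theorem pvBounds_run (k : Nat) (hk : 1 ≤ k) (x : String) (rest : List String)
    (hhead : rest = [] ∨ (rest ≠ [] ∧ rest.getD 0 "" ≠ x)) :
    pvBounds (List.replicate k x ++ rest) = 0 :: (pvBounds rest).map (· + k) := by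
  unfold pvBounds
  rw [pvStarts_run k hk x rest hhead]
  simp [Nat.add_comm]

theorem pvRender_shift (k : Nat) (x : String) (rest : List String) (p : Nat × Nat) :
    pvRender (List.replicate k x ++ rest) (p.1 + k, p.2 + k) = pvRender rest p := by
  rcases p with ⟨s, e⟩
  have hrun : (e + k) - (s + k) = e - s := by omega
  have hget : (List.replicate k x ++ rest).getD (s + k) "" = rest.getD s "" := by
    rw [Nat.add_comm s k]; exact pvGetD_run_right k x rest s
  simp only [List.getD_eq_getElem?_getD] at hget
  simp [pvRender, hrun, hget]

theorem pvB_eq_altLoop : ∀ (n : Nat) (l : List String), l.length ≤ n → pvB l = pvAltLoop l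
  | 0, l, h => by
    have : l = [] := List.eq_nil_of_length_eq_zero (by omega)
    subst this
    simp [pvB, pvBounds, pvStarts, pvAltLoop]
  | n + 1, [], _ => by simp [pvB, pvBounds, pvStarts, pvAltLoop]
  | n + 1, x :: xs, h => by
    obtain ⟨r, rest, hr⟩ : ∃ r rest, pvRun x xs = (r, rest) := ⟨_, _, rfl⟩
    have hdec : xs = List.replicate r x ++ rest := by
      have := pvRun_decomp x xs; rw [hr] at this; exact this
    have hhead : rest = [] ∨ (rest ≠ [] ∧ rest.getD 0 "" ≠ x) := by
      have := pvRun_head x xs; rw [hr] at this; exact this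
    have hl : x :: xs = List.replicate (r + 1) x ++ rest := by
      rw [hdec]; simp [List.replicate_succ]
    have hrestlen : rest.length ≤ n := by
      have h1 : (x :: xs).length = (r + 1) + rest.length := by rw [hl]; simp
      simp only [List.length_cons] at h1 h
      omega
    obtain ⟨bs, hbs⟩ := pvBounds_head rest
    have hbounds : pvBounds (x :: xs) = 0 :: (r + 1) :: bs.map (· + (r + 1)) := by
      rw [hl, pvBounds_run (r + 1) (by omega) x rest hhead, hbs]
      simp
    unfold pvB
    rw [hbounds]
    have hzip : ((0 :: (r + 1) :: bs.map (· + (r + 1))).zip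
        ((0 :: (r + 1) :: bs.map (· + (r + 1))).tail))
        = (0, r + 1) :: (((0 : Nat) :: bs).zip bs).map
            (fun p => (p.1 + (r + 1), p.2 + (r + 1))) := by
      simp only [List.tail_cons, List.zip_cons_cons]
      congr 1
      have : (r + 1 : Nat) :: bs.map (· + (r + 1)) = ((0 : Nat) :: bs).map (· + (r + 1)) := by
        simp
      rw [this, List.zip_map]
      rfl
    rw [hzip, List.flatMap_cons, List.flatMap_map]
    have hshift : ∀ p : Nat × Nat,
        pvRender (x :: xs) ((fun p : Nat × Nat => (p.1 + (r + 1), p.2 + (r + 1))) p)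
          = pvRender rest p := by
      intro p
      rw [hl]
      exact pvRender_shift (r + 1) x rest p
    have hcomp : (((0 : Nat) :: bs).zip bs).flatMap
          (fun a : Nat × Nat => pvRender (x :: xs) (a.1 + (r + 1), a.2 + (r + 1)))
        = (((0 : Nat) :: bs).zip bs).flatMap (pvRender rest) := by
      congr 1
      funext p
      exact hshift p
    rw [hcomp]
    have hrest : (((0 : Nat) :: bs).zip bs).flatMap (pvRender rest) = pvAltLoop rest := by
      have := pvB_eq_altLoop n rest hrestlen
      unfold pvB at this
      rw [hbs] at this
      simpa using this
    rw [hrest, pvAltLoop_cons, hr]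
    have hget0 : (x :: xs).getD 0 "" = x := rfl
    by_cases hbig : r > 2
    · simp [pvRender, pvEmit, hbig, List.getD_eq_getElem?_getD,
        if_pos (show 3 ≤ r by omega), Nat.lt_irrefl]
    · simp [pvRender, pvEmit, hbig, List.replicate_succ, List.getD_eq_getElem?_getD,
        if_neg (show ¬ 3 ≤ r by omega)]

-- ===== VERDICT (by name: the statement is the Claim_ definition above) =====
theorem collapse_repeated_errors_py_spec : Claim_equal_collapse_repeated_errors_py := by
  intro text _
  unfold Spec_collapse_repeated_errors_py
  simp only [collapse_repeated_errors_py, collapse_repeated_errors_py_alt]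
  by_cases hlen : ((PySem.Str.split? text "\n").getD []).length < 10
  · simp only [hlen, if_true]
  · simp only [hlen, if_false]
    rw [pvFlush_proj]
    cases hys : (PySem.Str.split? text "\n").getD [] with
    | nil => rw [hys] at hlen; simp at hlen
    | cons y ys =>
      rw [pvMain, ← pvB_eq_altLoop (y :: ys).length (y :: ys) (le_refl _)]
      rfl
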